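-- pv_equiv track=rewrite | github.com/Nickatak/B64 | b64.py | __buffer_to_ints
-- ===== SOURCE A (Python) =====
-- def __buffer_to_ints(buffer):
--     ints = [None] * 3
--     # Read the ints backwards.
--
--     for x in range(3):
--         byte = 0
--         for y in range(8):
--             byte |= (buffer & 1) << y
--             buffer >>= 1
--
--         ints[x] = byte
--
--     ints.reverse()
--     return ints
-- ===== SOURCE B (Python) =====
-- def __buffer_to_ints(buffer):
--     # Closed-form shift-and-mask, big-endian: no bit loops, no reverse.
--     return [(buffer >> 16) & 0xFF, (buffer >> 8) & 0xFF, buffer & 0xFF]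
-- ===== Notes on version B (the rewrite author's own statement) =====
-- stated objective: idiomatic
-- what changed: Replaces the nested per-bit accumulation loops (24 iterations of or-and-shift plus a final reverse) with a direct shift-and-mask closed form that emits the three bytes big-endian first.
import Mathlib
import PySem

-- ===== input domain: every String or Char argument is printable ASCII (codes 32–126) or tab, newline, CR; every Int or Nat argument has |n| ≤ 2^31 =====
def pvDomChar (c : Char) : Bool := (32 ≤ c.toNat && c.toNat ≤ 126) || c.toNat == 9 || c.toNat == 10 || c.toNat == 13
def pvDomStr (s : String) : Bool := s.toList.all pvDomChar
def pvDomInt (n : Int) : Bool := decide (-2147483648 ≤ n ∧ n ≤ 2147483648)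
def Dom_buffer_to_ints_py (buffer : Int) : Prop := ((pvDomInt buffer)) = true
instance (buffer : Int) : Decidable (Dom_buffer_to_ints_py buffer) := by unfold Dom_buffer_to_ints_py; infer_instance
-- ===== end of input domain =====

-- B replaces A's nested bit-accumulation loops by closed-form shift-and-mask per byte (alternative decomposition; return value only).


-- ===== PORT A =====
-- inner loop body: byte |= (buffer & 1) << y; buffer >>= 1
def btiStep (p : Int × Int) (y : Int) : Int × Int :=
  (PySem.Int.bor p.1 ((PySem.Int.band p.2 1) <<< y.toNat), p.2 >>> (1 : Nat))

def buffer_to_ints_py (buffer : Int) : List Int :=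
  let st := (PySem.List.pyRange 0 3 1).foldl
    (fun (st : Int × List Int) (_x : Int) =>
      let inner := (PySem.List.pyRange 0 8 1).foldl btiStep (0, st.1)
      (inner.2, st.2 ++ [inner.1]))
    (buffer, [])
  st.2.reverse

-- ===== PORT B =====
def buffer_to_ints_py_alt (buffer : Int) : List Int :=
  [PySem.Int.band (buffer >>> (16 : Nat)) 255,
   PySem.Int.band (buffer >>> (8 : Nat)) 255,
   PySem.Int.band buffer 255]

-- ===== PRECONDITION & SPEC =====
def Spec_buffer_to_ints_py (buffer : Int) (out : List Int) : Prop := out = buffer_to_ints_py_alt buffer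
instance (buffer : Int) (out : List Int) : Decidable (Spec_buffer_to_ints_py buffer out) := by unfold Spec_buffer_to_ints_py; infer_instance

-- ===== CLAIM (what is proved, stated in full; the proofs are below) =====
def Claim_equal_buffer_to_ints_py : Prop := ∀ (buffer : Int), Dom_buffer_to_ints_py buffer → Spec_buffer_to_ints_py buffer (buffer_to_ints_py buffer)

-- ===== LEMMAS AND PROOFS =====

-- x >> k is floor division by 2^k
theorem shr_fdiv (x : Int) (k : Nat) : x >>> k = PySem.Int.floordiv x (2^k) := by
  cases x with
  | ofNat n =>
      show Int.ofNat (n >>> k) = PySem.Int.floordiv (Int.ofNat n) (2^k)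
      simp [PySem.Int.floordiv, Nat.shiftRight_eq_div_pow]
      rw [Int.fdiv_eq_ediv_of_nonneg _ (by positivity)]
  | negSucc n =>
      show Int.negSucc (n >>> k) = PySem.Int.floordiv (Int.negSucc n) (2^k)
      obtain ⟨m, hm⟩ : ∃ m, 2^k = m+1 := ⟨2^k-1, by have := Nat.one_le_two_pow (n := k); omega⟩
      simp only [PySem.Int.floordiv, Nat.shiftRight_eq_div_pow]
      rw [show ((2:Int)^k) = Int.ofNat (m+1) by rw [← hm]; norm_num, hm]
      rfl

theorem nat_lor_two_pow {a y : Nat} (h : a < 2^y) : a ||| 2^y = a + 2^y := by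
  rw [Nat.add_comm]
  apply Nat.eq_of_testBit_eq
  intro i
  rw [Nat.testBit_or]
  rcases lt_trichotomy i y with hi | hi | hi
  · rw [Nat.testBit_two_pow_add_gt hi, Nat.testBit_two_pow_of_ne (by omega), Bool.or_false]
  · subst hi
    rw [Nat.testBit_two_pow_add_eq, Nat.testBit_two_pow_self, Nat.testBit_lt_two_pow h]
    simp
  · have hle : 2^(y+1) ≤ 2^i := Nat.pow_le_pow_right (by norm_num) (by omega)
    have h2 : 2^(y+1) = 2*2^y := by ring
    have e1 : (2^y + a).testBit i = false := Nat.testBit_lt_two_pow (by omega)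
    have e2 : a.testBit i = false := Nat.testBit_lt_two_pow (by omega)
    have e3 : (2^y : Nat).testBit i = false := Nat.testBit_two_pow_of_ne (by omega)
    simp [e1, e2, e3]

-- or-ing a fresh bit into a value below it is addition
theorem bor_step (r m : Int) (y : Nat) (hr0 : 0 ≤ r) (hr : r < 2^y)
    (hm : m = 0 ∨ m = 1) : PySem.Int.bor r (m <<< y) = r + m * 2^y := by
  have hcast : ((2^y : Nat) : Int) = 2^y := by push_cast; ring
  rcases hm with hm | hm <;> subst hm
  · simp [PySem.Int.bor_zero]
  · have h1 : ((1:Int) <<< y) = ((2^y : Nat) : Int) := by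
      rw [show (1:Int) <<< y = Int.ofNat (1 <<< y) from rfl, Nat.one_shiftLeft]; rfl
    rw [h1, PySem.Int.bor_of_nonneg hr0 (by positivity)]
    have hlt : r.toNat < 2^y := by omega
    rw [Int.toNat_natCast, nat_lor_two_pow hlt]
    push_cast
    omega

-- peeling the next bit extends the low-bits remainder
theorem emod_step (b : Int) (y : Nat) :
    b % (2^y) + ((b / 2^y) % 2) * 2^y = b % (2^(y+1)) := by
  have hp : (0:Int) < 2^y := by positivity
  have h1 := Int.mul_ediv_add_emod b (2^y)
  have h2 := Int.mul_ediv_add_emod (b / 2^y) 2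
  have hr1 := Int.emod_nonneg b (ne_of_gt hp)
  have hr2 := Int.emod_lt_of_pos b hp
  have hs1 := Int.emod_nonneg (b / 2^y) (by norm_num : (2:Int) ≠ 0)
  have hs2 := Int.emod_lt_of_pos (b / 2^y) (by norm_num : (0:Int) < 2)
  have hq : (2:Int)^(y+1) = 2^y * 2 := by ring
  have hge : 0 ≤ b % 2^y + ((b / 2^y) % 2) * 2^y := by nlinarith
  have hlt : b % 2^y + ((b / 2^y) % 2) * 2^y < 2^(y+1) := by nlinarith
  calc b % 2^y + ((b / 2^y) % 2) * 2^y
      = (b % 2^y + ((b / 2^y) % 2) * 2^y) % 2^(y+1) := (Int.emod_eq_of_lt hge hlt).symm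
    _ = ((b % 2^y + ((b / 2^y) % 2) * 2^y) + 2^(y+1) * ((b / 2^y) / 2)) % 2^(y+1) := by
        rw [Int.add_mul_emod_self_left]
    _ = b % 2^(y+1) := by
        congr 1
        rw [hq]; nlinarith [h1, h2]

-- one inner-loop iteration, on the invariant state
theorem btiStep_spec (b : Int) (y : Nat) :
    btiStep (PySem.Int.mod b (2^y), b >>> y) (y : Int) =
      (PySem.Int.mod b (2^(y+1)), b >>> (y+1)) := by
  have hp : (0:Int) < 2^y := by positivity
  have hcast : ∀ k : Nat, PySem.Int.mod b (2^k) = b % (2^k) := fun k =>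
    Int.fmod_eq_emod_of_nonneg b (by positivity)
  have hdiv : b >>> y = b / 2^y := by
    rw [shr_fdiv]; exact Int.fdiv_eq_ediv_of_nonneg b (le_of_lt hp)
  unfold btiStep
  simp only [Int.toNat_natCast]
  rw [PySem.Int.band_one, hdiv]
  have hmod2 : PySem.Int.mod (b / 2^y) 2 = (b / 2^y) % 2 :=
    Int.fmod_eq_emod_of_nonneg _ (by norm_num)
  rw [hmod2, hcast y,
    bor_step _ _ _ (Int.emod_nonneg b (ne_of_gt hp)) (Int.emod_lt_of_pos b hp)
      (by omega), emod_step b y]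
  rw [hcast (y+1)]
  refine congrArg (Prod.mk _) ?_
  show (b / 2^y) >>> (1:Nat) = b >>> (y+1)
  rw [shr_fdiv, shr_fdiv]
  unfold PySem.Int.floordiv
  rw [Int.fdiv_eq_ediv_of_nonneg _ (by norm_num), Int.fdiv_eq_ediv_of_nonneg _ (by positivity),
    pow_one, Int.ediv_ediv_of_nonneg (le_of_lt hp)]
  norm_num [pow_succ]

-- the inner 8-bit loop extracts the low byte and shifts it out
theorem inner_spec (b : Int) :
    (PySem.List.pyRange 0 8 1).foldl btiStep (0, b) =
      (PySem.Int.mod b 256, b >>> (8:Nat)) := by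
  have hrange : PySem.List.pyRange 0 8 1 = [0,1,2,3,4,5,6,7] := by decide
  have h0 := btiStep_spec b 0
  have h1 := btiStep_spec b 1
  have h2 := btiStep_spec b 2
  have h3 := btiStep_spec b 3
  have h4 := btiStep_spec b 4
  have h5 := btiStep_spec b 5
  have h6 := btiStep_spec b 6
  have h7 := btiStep_spec b 7
  norm_num at h0 h1 h2 h3 h4 h5 h6 h7
  rw [hrange]
  simp only [List.foldl]
  rw [h0, h1, h2, h3, h4, h5, h6, h7,
    show PySem.Int.mod b 256 = b % 256 from Int.fmod_eq_emod_of_nonneg _ (by norm_num)]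

theorem band255 (x : Int) : PySem.Int.band x 255 = PySem.Int.mod x 256 := by
  cases x with
  | ofNat n =>
    show PySem.Int.band (Int.ofNat n) 255 = PySem.Int.mod (Int.ofNat n) 256
    rw [show (Int.ofNat n) = ((n:Nat):Int) from rfl,
      show (255:Int) = ((255:Nat):Int) from rfl, PySem.Int.band_natCast]
    rw [show PySem.Int.mod ((n:Nat):Int) 256 = ((n:Nat):Int) % 256 from
      Int.fmod_eq_emod_of_nonneg _ (by norm_num)]
    have : n &&& 255 = n % 256 := Nat.and_two_pow_sub_one_eq_mod n 8
    omega
  | negSucc n =>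
    have hb : PySem.Int.band (Int.negSucc n) 255 = ((255 - (255 &&& n) : Nat) : Int) := by
      unfold PySem.Int.band
      rw [if_neg (by omega), if_pos (by norm_num)]
      norm_num [show Int.toNat 255 = 255 from rfl]
    have hm : PySem.Int.mod (Int.negSucc n) 256 = (Int.negSucc n) % 256 :=
      Int.fmod_eq_emod_of_nonneg _ (by norm_num)
    have hand : 255 &&& n = n % 256 := by
      rw [Nat.and_comm]; exact Nat.and_two_pow_sub_one_eq_mod n 8
    rw [hb, hm, hand, Int.negSucc_eq]
    omega

-- ===== VERDICT (by name: the statement is the Claim_ definition above) =====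
theorem buffer_to_ints_py_spec : Claim_equal_buffer_to_ints_py := by
  intro buffer _
  show buffer_to_ints_py buffer = buffer_to_ints_py_alt buffer
  have hrange3 : PySem.List.pyRange 0 3 1 = [0,1,2] := by decide
  unfold buffer_to_ints_py buffer_to_ints_py_alt
  rw [hrange3]
  simp only [List.foldl, inner_spec, List.nil_append, List.cons_append, List.reverse_cons,
    List.reverse_nil]
  rw [band255, band255, band255]
  have h16 : buffer >>> (8:Nat) >>> (8:Nat) = buffer >>> (16:Nat) := by
    rw [shr_fdiv, shr_fdiv, shr_fdiv]
    unfold PySem.Int.floordiv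
    rw [Int.fdiv_eq_ediv_of_nonneg _ (by norm_num), Int.fdiv_eq_ediv_of_nonneg _ (by norm_num),
      Int.fdiv_eq_ediv_of_nonneg _ (by norm_num), Int.ediv_ediv_of_nonneg (by norm_num : (0:Int) ≤ 2^8)]
    norm_num
  rw [h16]
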